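-- pv_equiv track=rewrite | github.com/leksikov/konte | evaluation/experiments/debug/analyze_context_impact.py | analyze_retrieval_overlap
-- ===== SOURCE A (Python) =====
-- def analyze_retrieval_overlap(simple: list, contextual: list) -> dict:
--     """Analyze how much retrieval overlap there is."""
--     same_first = 0
--     same_top3 = 0
--     same_any = 0
--
--     for i in range(len(simple)):
--         s_ctx = simple[i].get('retrieval_context', [])
--         c_ctx = contextual[i].get('retrieval_context', [])
--
--         if not s_ctx or not c_ctx:
--             continue
--
--         # Compare first chunk (top 100 chars)
--         if s_ctx[0][:100] == c_ctx[0][:100]: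
--             same_first += 1
--
--         # Compare top 3 (any overlap)
--         s_top3 = set(c[:100] for c in s_ctx[:3])
--         c_top3 = set(c[:100] for c in c_ctx[:3])
--         if s_top3 & c_top3:
--             same_top3 += 1
--
--         # Any chunk overlap in top 5
--         s_top5 = set(c[:100] for c in s_ctx[:5])
--         c_top5 = set(c[:100] for c in c_ctx[:5])
--         if s_top5 & c_top5:
--             same_any += 1
--
--     return {
--         "same_first_chunk": same_first,
--         "overlap_in_top3": same_top3,
--         "overlap_in_top5": same_any,
--         "total": len(simple),
--     }
-- ===== SOURCE B (Python) =====
-- def analyze_retrieval_overlap(simple: list, contextual: list) -> dict: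
--     """Analyze how much retrieval overlap there is.
--
--     Classifies each pair once into the *innermost* overlap level (first chunk
--     equal -> level 1, else top-3 overlap -> level 3, else top-5 -> level 5,
--     else none), using that first-chunk equality implies top-3 overlap and
--     top-3 overlap implies top-5 overlap (the top-3 prefix sets are subsets of
--     the top-5 ones); the three counts are then cumulative sums over levels.
--     """
--     hist = {1: 0, 3: 0, 5: 0}
--     for i in range(len(simple)):
--         s_ctx = simple[i].get('retrieval_context', [])
--         c_ctx = contextual[i].get('retrieval_context', [])
--         if not s_ctx or not c_ctx:
--             continue
--         lvl = _overlap_level(s_ctx, c_ctx)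
--         if lvl:
--             hist[lvl] += 1
--     top3 = hist[1] + hist[3]
--     return {
--         "same_first_chunk": hist[1],
--         "overlap_in_top3": top3,
--         "overlap_in_top5": top3 + hist[5],
--         "total": len(simple),
--     }
--
--
-- def _overlap_level(s_ctx, c_ctx):
--     """Smallest k in (1, 3, 5) at which the top-k 100-char prefixes overlap, or 0."""
--     if s_ctx[0][:100] == c_ctx[0][:100]:
--         return 1
--     for k in (3, 5):
--         c_pfx = {c[:100] for c in c_ctx[:k]}
--         if any(s[:100] in c_pfx for s in s_ctx[:k]):
--             return k
--     return 0
-- ===== Notes on version B (the rewrite author's own statement) =====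
-- stated objective: alternative
-- what changed: Instead of A's three independent per-pair overlap tests feeding three counters, B classifies each pair once into its innermost overlap level (first-chunk equal / top-3 / top-5 / none) with a short-circuiting elif chain, accumulates a level histogram, and derives the three counts as cumulative sums, relying on the proved nesting first-chunk-equal => top-3 overlap => top-5 overlap.
import Mathlib
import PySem

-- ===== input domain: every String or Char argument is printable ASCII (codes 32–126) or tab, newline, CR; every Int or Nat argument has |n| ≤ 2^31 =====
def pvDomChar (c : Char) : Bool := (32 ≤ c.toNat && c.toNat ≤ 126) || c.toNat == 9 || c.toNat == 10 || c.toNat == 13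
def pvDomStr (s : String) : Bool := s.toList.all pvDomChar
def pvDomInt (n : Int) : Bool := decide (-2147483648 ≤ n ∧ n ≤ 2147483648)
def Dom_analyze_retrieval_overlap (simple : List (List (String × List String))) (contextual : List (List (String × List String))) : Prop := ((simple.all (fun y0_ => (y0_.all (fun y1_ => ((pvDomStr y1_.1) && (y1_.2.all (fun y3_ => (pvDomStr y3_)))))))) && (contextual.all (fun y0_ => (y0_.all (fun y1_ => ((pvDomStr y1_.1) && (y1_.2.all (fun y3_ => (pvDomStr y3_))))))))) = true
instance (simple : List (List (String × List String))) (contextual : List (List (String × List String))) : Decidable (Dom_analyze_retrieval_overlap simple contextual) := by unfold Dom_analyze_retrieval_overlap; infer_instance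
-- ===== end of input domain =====

-- B replaces A's three independent per-pair overlap tests with a single short-circuiting
-- classification of each pair into its innermost overlap level (1/3/5/none) plus a level histogram
-- whose cumulative sums are the three counts (objective: alternative algorithm; correctness rests
-- on first-chunk equality ⇒ top-3 overlap ⇒ top-5 overlap, proved below).


-- ===== PORT A =====
-- s[:100] on a string
def pvPfx (s : String) : String := PySem.Str.slice s none (some 100)

-- d.get('retrieval_context', [])
def pvCtx (d : List (String × List String)) : List String :=
  PySem.Dict.getD ⟨d⟩ "retrieval_context" []

-- set(c[:100] for c in ctx[:k])
def pvPrefixes (ctx : List String) (k : Int) : PySem.Set String :=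
  PySem.Set.ofList ((PySem.List.slice ctx none (some k)).map pvPfx)

-- one iteration of A's loop over i, carrying (same_first, same_top3, same_any)
def pvStepA (simple contextual : List (List (String × List String)))
    (st : Int × Int × Int) (i : Int) : Int × Int × Int :=
  let s_ctx := pvCtx (PySem.List.pyGetD simple i [])
  let c_ctx := pvCtx (PySem.List.pyGetD contextual i [])
  if s_ctx = [] ∨ c_ctx = [] then st
  else
    let sf := if pvPfx (PySem.List.pyGetD s_ctx 0 "") = pvPfx (PySem.List.pyGetD c_ctx 0 "")
              then st.1 + 1 else st.1
    let t3 := if PySem.Set.inter (pvPrefixes s_ctx 3) (pvPrefixes c_ctx 3) ≠ [] then st.2.1 + 1 else st.2.1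
    let sa := if PySem.Set.inter (pvPrefixes s_ctx 5) (pvPrefixes c_ctx 5) ≠ [] then st.2.2 + 1 else st.2.2
    (sf, t3, sa)

def analyze_retrieval_overlap (simple : List (List (String × List String))) (contextual : List (List (String × List String))) : List (String × Int) :=
  let st := (PySem.List.pyRange 0 (simple.length : Int)).foldl (pvStepA simple contextual) (0, 0, 0)
  [("same_first_chunk", st.1), ("overlap_in_top3", st.2.1),
   ("overlap_in_top5", st.2.2), ("total", (simple.length : Int))]

-- ===== PORT B =====
-- 'any(s[:100] in c_pfx for s in s_ctx[:k])' with c_pfx = {c[:100] for c in c_ctx[:k]}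
def pvAnyTest (s_ctx c_ctx : List String) (k : Int) : Bool :=
  let c_pfx := pvPrefixes c_ctx k
  ((PySem.List.slice s_ctx none (some k)).map pvPfx).any (fun x => PySem.Set.contains c_pfx x)

-- _overlap_level: 1 if the first prefixes are equal, else the first k in (3, 5) whose test fires, else 0
def pvLevel (s_ctx c_ctx : List String) : Int :=
  if pvPfx (PySem.List.pyGetD s_ctx 0 "") = pvPfx (PySem.List.pyGetD c_ctx 0 "") then 1
  else
    match ([3, 5] : List Int).find? (fun k => pvAnyTest s_ctx c_ctx k) with
    | some k => k
    | none => 0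

-- one iteration of B's loop: classify the pair and bump its histogram bucket
def pvStepB (simple contextual : List (List (String × List String)))
    (hist : PySem.Dict Int Int) (i : Int) : PySem.Dict Int Int :=
  let s_ctx := pvCtx (PySem.List.pyGetD simple i [])
  let c_ctx := pvCtx (PySem.List.pyGetD contextual i [])
  if s_ctx = [] ∨ c_ctx = [] then hist
  else
    let lvl := pvLevel s_ctx c_ctx
    if lvl ≠ 0 then PySem.Dict.insert hist lvl (PySem.Dict.getD hist lvl 0 + 1) else hist

def analyze_retrieval_overlap_alt (simple : List (List (String × List String))) (contextual : List (List (String × List String))) : List (String × Int) :=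
  let hist := (PySem.List.pyRange 0 (simple.length : Int)).foldl
                (pvStepB simple contextual) (PySem.Dict.mk [(1, 0), (3, 0), (5, 0)])
  let top3 := PySem.Dict.getD hist 1 0 + PySem.Dict.getD hist 3 0
  [("same_first_chunk", PySem.Dict.getD hist 1 0), ("overlap_in_top3", top3),
   ("overlap_in_top5", top3 + PySem.Dict.getD hist 5 0), ("total", (simple.length : Int))]

-- ===== PRECONDITION & SPEC =====
-- Pre_ excludes exactly the inputs where Python raises IndexError: contextual[i] is read for every
-- i < len(simple), so A (and B) raise iff contextual is shorter than simple.
def Pre_analyze_retrieval_overlap (simple : List (List (String × List String))) (contextual : List (List (String × List String))) : Prop :=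
  simple.length ≤ contextual.length
instance (simple : List (List (String × List String))) (contextual : List (List (String × List String))) : Decidable (Pre_analyze_retrieval_overlap simple contextual) := by unfold Pre_analyze_retrieval_overlap; infer_instance

def pvWitness_analyze_retrieval_overlap : (List (List (String × List String))) × (List (List (String × List String))) :=
  ([[("retrieval_context", ["abc", "xyz"])]], [[("retrieval_context", ["abc"])]])

def Spec_analyze_retrieval_overlap (simple : List (List (String × List String))) (contextual : List (List (String × List String))) (out : List (String × Int)) : Prop := out = analyze_retrieval_overlap_alt simple contextual
instance (simple : List (List (String × List String))) (contextual : List (List (String × List String))) (out : List (String × Int)) : Decidable (Spec_analyze_retrieval_overlap simple contextual out) := by unfold Spec_analyze_retrieval_overlap; infer_instance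

-- ===== CLAIM (what is proved, stated in full; the proofs are below) =====
def Claim_equal_analyze_retrieval_overlap : Prop := ∀ (simple : List (List (String × List String))) (contextual : List (List (String × List String))), Dom_analyze_retrieval_overlap simple contextual → Pre_analyze_retrieval_overlap simple contextual → Spec_analyze_retrieval_overlap simple contextual (analyze_retrieval_overlap simple contextual)

-- ===== LEMMAS AND PROOFS =====

-- A's per-pair booleans, as predicates on the context pair
def qA1 (p : List String × List String) : Bool :=
  match p with
  | (s0 :: _, c0 :: _) => pvPfx s0 == pvPfx c0
  | _ => false

def qOv (k : Int) (p : List String × List String) : Bool :=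
  match p with
  | (s@(_ :: _), c@(_ :: _)) => decide (PySem.Set.inter (pvPrefixes s k) (pvPrefixes c k) ≠ [])
  | _ => false

-- B's per-pair level predicate
def qLv (k : Int) (p : List String × List String) : Bool :=
  match p with
  | (s@(_ :: _), c@(_ :: _)) => pvLevel s c == k
  | _ => false

theorem pv_inter_ne_iff (xs ys : List String) :
    PySem.Set.inter (PySem.Set.ofList xs) (PySem.Set.ofList ys) ≠ [] ↔ ∃ x, x ∈ xs ∧ x ∈ ys := by
  rw [← List.isEmpty_eq_false_iff, List.isEmpty_eq_false_iff_exists_mem]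
  constructor
  · rintro ⟨x, hx⟩
    have := (PySem.Set.mem_inter _ _ _).mp hx
    exact ⟨x, (PySem.Set.mem_ofList _ _).mp this.1, (PySem.Set.mem_ofList _ _).mp this.2⟩
  · rintro ⟨x, h1, h2⟩
    exact ⟨x, (PySem.Set.mem_inter _ _ _).mpr ⟨(PySem.Set.mem_ofList _ _).mpr h1, (PySem.Set.mem_ofList _ _).mpr h2⟩⟩

theorem pv_anyTest_iff (s c : List String) (k : Int) (hk : 0 ≤ k) :
    pvAnyTest s c k = true ↔ ∃ x, x ∈ (s.take k.toNat).map pvPfx ∧ x ∈ (c.take k.toNat).map pvPfx := by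
  simp [pvAnyTest, pvPrefixes, PySem.List.slice_to _ hk, List.any_eq_true, PySem.Set.mem_ofList]

theorem pv_inter_pfx_iff (s c : List String) (k : Int) (hk : 0 ≤ k) :
    (PySem.Set.inter (pvPrefixes s k) (pvPrefixes c k) ≠ []) ↔
      ∃ x, x ∈ (s.take k.toNat).map pvPfx ∧ x ∈ (c.take k.toNat).map pvPfx := by
  simp [pvPrefixes, PySem.List.slice_to _ hk, pv_inter_ne_iff]

-- monotone: a common prefix in the top-3 sets is one in the top-5 sets
theorem pv_mono (s c : List String)
    (h : ∃ x, x ∈ (s.take (3:Int).toNat).map pvPfx ∧ x ∈ (c.take (3:Int).toNat).map pvPfx) :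
    ∃ x, x ∈ (s.take (5:Int).toNat).map pvPfx ∧ x ∈ (c.take (5:Int).toNat).map pvPfx := by
  obtain ⟨x, hs, hc⟩ := h
  have h3 : ∀ (l : List String), (l.take (3:Int).toNat).map pvPfx ⊆ (l.take (5:Int).toNat).map pvPfx := by
    intro l
    apply List.map_subset
    intro y hy
    rw [show (3:Int).toNat = 3 from rfl] at hy
    rw [show (5:Int).toNat = 5 from rfl]
    rw [show (3:Nat) = min 3 5 from rfl, ← List.take_take] at hy
    exact List.mem_of_mem_take hy
  exact ⟨x, h3 s hs, h3 c hc⟩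

-- the structural core: per pair, A's three booleans are the cumulative versions of B's level
theorem pv_pointwise (p : List String × List String) :
    qA1 p = qLv 1 p ∧ qOv 3 p = (qLv 1 p || qLv 3 p) ∧ qOv 5 p = (qLv 1 p || qLv 3 p || qLv 5 p) := by
  obtain ⟨s, c⟩ := p
  match s, c with
  | [], _ => simp [qA1, qOv, qLv]
  | _ :: _, [] => simp [qA1, qOv, qLv]
  | s0 :: s', c0 :: c' =>
    simp only [qA1, qOv, qLv]
    by_cases h1 : pvPfx s0 = pvPfx c0
    · have hl : pvLevel (s0 :: s') (c0 :: c') = 1 := by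
        unfold pvLevel
        simp [PySem.List.pyGetD_zero_cons, h1]
      have hcommon3 : ∃ x, x ∈ ((s0 :: s').take (3:Int).toNat).map pvPfx ∧ x ∈ ((c0 :: c').take (3:Int).toNat).map pvPfx :=
        ⟨pvPfx s0, by simp, by simp [h1]⟩
      refine ⟨by simp [h1, hl], ?_, ?_⟩
      · rw [hl]; simp [(pv_inter_pfx_iff _ _ 3 (by norm_num)).mpr hcommon3]
      · rw [hl]; simp [(pv_inter_pfx_iff _ _ 5 (by norm_num)).mpr (pv_mono _ _ hcommon3)]
    · by_cases h3 : pvAnyTest (s0 :: s') (c0 :: c') 3 = true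
      · have hl : pvLevel (s0 :: s') (c0 :: c') = 3 := by
          unfold pvLevel
          simp [PySem.List.pyGetD_zero_cons, h1, List.find?, h3]
        have hc3 := (pv_anyTest_iff _ _ 3 (by norm_num)).mp h3
        refine ⟨by simp [h1, hl], ?_, ?_⟩
        · rw [hl]; simp [(pv_inter_pfx_iff _ _ 3 (by norm_num)).mpr hc3]
        · rw [hl]; simp [(pv_inter_pfx_iff _ _ 5 (by norm_num)).mpr (pv_mono _ _ hc3)]
      · by_cases h5 : pvAnyTest (s0 :: s') (c0 :: c') 5 = true
        · have hl : pvLevel (s0 :: s') (c0 :: c') = 5 := by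
            unfold pvLevel
            simp [PySem.List.pyGetD_zero_cons, h1, List.find?, h3, h5]
          have hc5 := (pv_anyTest_iff _ _ 5 (by norm_num)).mp h5
          have hn3 : ¬ ∃ x, x ∈ ((s0 :: s').take (3:Int).toNat).map pvPfx ∧ x ∈ ((c0 :: c').take (3:Int).toNat).map pvPfx :=
            fun hx => h3 ((pv_anyTest_iff _ _ 3 (by norm_num)).mpr hx)
          refine ⟨by simp [h1, hl], ?_, ?_⟩
          · rw [hl]
            have := (pv_inter_pfx_iff (s0 :: s') (c0 :: c') 3 (by norm_num)).not.mpr hn3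
            simp [this]
          · rw [hl]; simp [(pv_inter_pfx_iff _ _ 5 (by norm_num)).mpr hc5]
        · have hl : pvLevel (s0 :: s') (c0 :: c') = 0 := by
            unfold pvLevel
            simp [PySem.List.pyGetD_zero_cons, h1, List.find?, h3, h5]
          have hn3 : ¬ ∃ x, x ∈ ((s0 :: s').take (3:Int).toNat).map pvPfx ∧ x ∈ ((c0 :: c').take (3:Int).toNat).map pvPfx :=
            fun hx => h3 ((pv_anyTest_iff _ _ 3 (by norm_num)).mpr hx)
          have hn5 : ¬ ∃ x, x ∈ ((s0 :: s').take (5:Int).toNat).map pvPfx ∧ x ∈ ((c0 :: c').take (5:Int).toNat).map pvPfx :=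
            fun hx => h5 ((pv_anyTest_iff _ _ 5 (by norm_num)).mpr hx)
          refine ⟨by simp [h1, hl], ?_, ?_⟩
          · rw [hl]
            have := (pv_inter_pfx_iff (s0 :: s') (c0 :: c') 3 (by norm_num)).not.mpr hn3
            simp [this]
          · rw [hl]
            have := (pv_inter_pfx_iff (s0 :: s') (c0 :: c') 5 (by norm_num)).not.mpr hn5
            simp [this]

theorem pvLevel_cases (s c : List String) :
    pvLevel s c = 0 ∨ pvLevel s c = 1 ∨ pvLevel s c = 3 ∨ pvLevel s c = 5 := by
  rw [pvLevel.eq_def]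
  split
  · right; left; rfl
  · cases h3 : pvAnyTest s c 3 <;> cases h5 : pvAnyTest s c 5 <;> simp [List.find?, h3, h5]

theorem qLv_excl (j k : Int) (p : List String × List String)
    (hj : qLv j p = true) (hk : qLv k p = true) : j = k := by
  obtain ⟨s, c⟩ := p
  rcases s with _ | ⟨s0, s'⟩
  · simp [qLv] at hj
  rcases c with _ | ⟨c0, c'⟩
  · simp [qLv] at hj
  simp only [qLv, beq_iff_eq] at hj hk
  omega

-- counts of A's booleans are cumulative sums of B's level counts
theorem pv_counts (f : Int → List String × List String) (l : List Int) :
    l.countP (fun i => qA1 (f i)) = l.countP (fun i => qLv 1 (f i)) ∧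
    l.countP (fun i => qOv 3 (f i)) = l.countP (fun i => qLv 1 (f i)) + l.countP (fun i => qLv 3 (f i)) ∧
    l.countP (fun i => qOv 5 (f i)) = l.countP (fun i => qLv 1 (f i)) + l.countP (fun i => qLv 3 (f i)) + l.countP (fun i => qLv 5 (f i)) := by
  induction l with
  | nil => simp
  | cons i l ih =>
    obtain ⟨ih1, ih2, ih3⟩ := ih
    obtain ⟨e1, e2, e3⟩ := pv_pointwise (f i)
    simp only [List.countP_cons, e1, e2, e3, ih1, ih2, ih3]
    cases h1 : qLv 1 (f i) <;> cases h3 : qLv 3 (f i) <;> cases h5 : qLv 5 (f i) <;>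
      first
        | exact absurd (qLv_excl 1 3 _ h1 h3) (by decide)
        | exact absurd (qLv_excl 1 5 _ h1 h5) (by decide)
        | exact absurd (qLv_excl 3 5 _ h3 h5) (by decide)
        | (simp; omega)
        | simp

theorem pvStepA_eq (simple contextual : List (List (String × List String)))
    (st : Int × Int × Int) (i : Int) :
    pvStepA simple contextual st i =
      (st.1 + if qA1 (pvCtx (PySem.List.pyGetD simple i []), pvCtx (PySem.List.pyGetD contextual i [])) then 1 else 0,
       st.2.1 + if qOv 3 (pvCtx (PySem.List.pyGetD simple i []), pvCtx (PySem.List.pyGetD contextual i [])) then 1 else 0,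
       st.2.2 + if qOv 5 (pvCtx (PySem.List.pyGetD simple i []), pvCtx (PySem.List.pyGetD contextual i [])) then 1 else 0) := by
  unfold pvStepA
  rcases hs : pvCtx (PySem.List.pyGetD simple i []) with _ | ⟨s0, s'⟩ <;>
    rcases hc : pvCtx (PySem.List.pyGetD contextual i []) with _ | ⟨c0, c'⟩ <;>
      simp [qA1, qOv, PySem.List.pyGetD_zero_cons] <;> split_ifs <;> simp_all

-- A's loop splits into three independent counts
theorem pvFoldA_split (simple contextual : List (List (String × List String)))
    (l : List Int) (a b c : Int) :
    l.foldl (pvStepA simple contextual) (a, b, c) =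
      (a + l.countP (fun i => qA1 (pvCtx (PySem.List.pyGetD simple i []), pvCtx (PySem.List.pyGetD contextual i []))),
       b + l.countP (fun i => qOv 3 (pvCtx (PySem.List.pyGetD simple i []), pvCtx (PySem.List.pyGetD contextual i []))),
       c + l.countP (fun i => qOv 5 (pvCtx (PySem.List.pyGetD simple i []), pvCtx (PySem.List.pyGetD contextual i [])))) := by
  induction l generalizing a b c with
  | nil => simp
  | cons i l ih =>
    rw [List.foldl_cons, pvStepA_eq, ih]
    simp only [List.countP_cons]
    refine Prod.ext ?_ (Prod.ext ?_ ?_) <;> simp <;> split_ifs <;> push_cast <;> ring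

theorem pvStepB_eq (simple contextual : List (List (String × List String)))
    (a b c : Int) (i : Int) :
    pvStepB simple contextual (PySem.Dict.mk [(1, a), (3, b), (5, c)]) i =
      PySem.Dict.mk
        [(1, a + if qLv 1 (pvCtx (PySem.List.pyGetD simple i []), pvCtx (PySem.List.pyGetD contextual i [])) then 1 else 0),
         (3, b + if qLv 3 (pvCtx (PySem.List.pyGetD simple i []), pvCtx (PySem.List.pyGetD contextual i [])) then 1 else 0),
         (5, c + if qLv 5 (pvCtx (PySem.List.pyGetD simple i []), pvCtx (PySem.List.pyGetD contextual i [])) then 1 else 0)] := by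
  unfold pvStepB
  rcases hs : pvCtx (PySem.List.pyGetD simple i []) with _ | ⟨s0, s'⟩ <;>
    rcases hc : pvCtx (PySem.List.pyGetD contextual i []) with _ | ⟨c0, c'⟩ <;>
      simp [qLv]
  rcases pvLevel_cases (s0 :: s') (c0 :: c') with h | h | h | h <;>
    simp [h, PySem.Dict.insert, PySem.Dict.getD, PySem.Dict.get?]

-- B's loop builds the level histogram
theorem pvFoldB_split (simple contextual : List (List (String × List String)))
    (l : List Int) (a b c : Int) :
    l.foldl (pvStepB simple contextual) (PySem.Dict.mk [(1, a), (3, b), (5, c)]) =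
      PySem.Dict.mk
        [(1, a + l.countP (fun i => qLv 1 (pvCtx (PySem.List.pyGetD simple i []), pvCtx (PySem.List.pyGetD contextual i [])))),
         (3, b + l.countP (fun i => qLv 3 (pvCtx (PySem.List.pyGetD simple i []), pvCtx (PySem.List.pyGetD contextual i [])))),
         (5, c + l.countP (fun i => qLv 5 (pvCtx (PySem.List.pyGetD simple i []), pvCtx (PySem.List.pyGetD contextual i []))))] := by
  induction l generalizing a b c with
  | nil => simp
  | cons i l ih =>
    rw [List.foldl_cons, pvStepB_eq, ih]
    simp only [List.countP_cons]
    refine congrArg PySem.Dict.mk ?_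
    simp only [List.cons.injEq, Prod.mk.injEq, and_true]
    refine ⟨⟨trivial, ?_⟩, ⟨trivial, ?_⟩, trivial, ?_⟩ <;> split_ifs <;> push_cast <;> ring

-- ===== VERDICT (by name: the statement is the Claim_ definition above) =====
theorem analyze_retrieval_overlap_spec : Claim_equal_analyze_retrieval_overlap := by
  intro simple contextual _ _
  unfold Spec_analyze_retrieval_overlap analyze_retrieval_overlap analyze_retrieval_overlap_alt
  rw [pvFoldA_split, pvFoldB_split]
  obtain ⟨c1, c2, c3⟩ := pv_counts
    (fun i => (pvCtx (PySem.List.pyGetD simple i []), pvCtx (PySem.List.pyGetD contextual i [])))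
    (PySem.List.pyRange 0 (simple.length : Int))
  simp [PySem.Dict.getD, PySem.Dict.get?, c1, c2, c3]
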